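-- pv_equiv track=rewrite | github.com/ACComputing/acholding-catsdk1.x- | ###catsdk4k.py | _normalize_url
-- ===== SOURCE A (Python) =====
-- def _normalize_url(raw):
--     url = raw.strip().rstrip("/")
--     if not url.endswith("/v1/chat/completions"):
--         for suffix in ("/v1/chat", "/v1"):
--             if url.endswith(suffix):
--                 url = url[: -len(suffix)]
--                 break
--         url += "/v1/chat/completions"
--     return url
-- ===== SOURCE B (Python) =====
-- CANON = ["v1", "chat", "completions"]
--
-- def _normalize_url(raw):
--     parts = raw.strip().rstrip("/").split("/")
--     for k in (3, 2, 1):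
--         if len(parts) > k and parts[-k:] == CANON[:k]:
--             parts = parts[:-k]
--             break
--     return "/".join(parts) + "/v1/chat/completions"
-- ===== Notes on version B (the rewrite author's own statement) =====
-- stated objective: alternative
-- what changed: B tokenizes the URL into path components with split('/'), drops the longest component tail matching a prefix of ['v1','chat','completions'], and unconditionally re-appends '/v1/chat/completions', instead of A's endswith string-suffix tests with an early return for an already-canonical URL.
import Mathlib
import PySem

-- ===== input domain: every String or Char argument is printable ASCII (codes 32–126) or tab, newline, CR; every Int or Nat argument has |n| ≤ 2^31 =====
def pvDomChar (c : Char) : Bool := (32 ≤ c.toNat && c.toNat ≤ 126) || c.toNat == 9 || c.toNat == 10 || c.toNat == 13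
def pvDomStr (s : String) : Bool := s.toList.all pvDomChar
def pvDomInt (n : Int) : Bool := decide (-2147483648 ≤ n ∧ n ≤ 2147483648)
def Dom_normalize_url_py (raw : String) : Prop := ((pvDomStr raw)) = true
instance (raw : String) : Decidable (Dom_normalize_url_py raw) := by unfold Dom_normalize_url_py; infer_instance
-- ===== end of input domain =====

-- B splits the URL into '/'-separated path components, drops the longest component tail matching a
-- prefix of ["v1","chat","completions"], and unconditionally re-appends "/v1/chat/completions",
-- instead of A's endswith string-suffix tests with an early return; alternative decomposition, same cost.

-- ===== PORT A =====
-- hand port of Python's s.rstrip("/") (PySem has no chars-argument rstrip): drop trailing '/' — exact.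
def pyRstripSlash (cs : List Char) : List Char := (cs.reverse.dropWhile (· == '/')).reverse

def normalize_url_py (raw : String) : String :=
  let url := pyRstripSlash (PySem.Chars.strip raw.toList)
  if PySem.Chars.endswith url "/v1/chat/completions".toList = false then
    -- for suffix in ("/v1/chat", "/v1"): if url.endswith(suffix): url = url[:-len(suffix)]; break
    let url :=
      if PySem.Chars.endswith url "/v1/chat".toList then PySem.Chars.slice url none (some (-8))
      else if PySem.Chars.endswith url "/v1".toList then PySem.Chars.slice url none (some (-3))
      else url
    String.ofList (url ++ "/v1/chat/completions".toList)
  else String.ofList url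

-- ===== PORT B =====
def nuCanon : List (List Char) := ["v1".toList, "chat".toList, "completions".toList]

def normalize_url_py_alt (raw : String) : String :=
  let parts := PySem.Chars.splitOn (pyRstripSlash (PySem.Chars.strip raw.toList)) ['/']
  -- for k in (3, 2, 1): if len(parts) > k and parts[-k:] == CANON[:k]: parts = parts[:-k]; break
  let parts :=
    if 3 < parts.length ∧ PySem.List.slice parts (some (-3)) none = nuCanon.take 3 then
      PySem.List.slice parts none (some (-3))
    else if 2 < parts.length ∧ PySem.List.slice parts (some (-2)) none = nuCanon.take 2 then
      PySem.List.slice parts none (some (-2))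
    else if 1 < parts.length ∧ PySem.List.slice parts (some (-1)) none = nuCanon.take 1 then
      PySem.List.slice parts none (some (-1))
    else parts
  String.ofList (PySem.Chars.join ['/'] parts ++ "/v1/chat/completions".toList)

-- ===== PRECONDITION & SPEC =====
def Spec_normalize_url_py (raw : String) (out : String) : Prop := out = normalize_url_py_alt raw
instance (raw : String) (out : String) : Decidable (Spec_normalize_url_py raw out) := by unfold Spec_normalize_url_py; infer_instance

-- ===== CLAIM (what is proved, stated in full; the proofs are below) =====
def Claim_equal_normalize_url_py : Prop := ∀ (raw : String), Dom_normalize_url_py raw → Spec_normalize_url_py raw (normalize_url_py raw)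

-- ===== LEMMAS AND PROOFS =====

-- a simple structural splitter on '/', used only to reason about PySem.Chars.splitOn
def splitSlashAux : List Char → List Char × List (List Char)
  | [] => ([], [])
  | c :: rest =>
    let r := splitSlashAux rest
    if c = '/' then ([], r.1 :: r.2) else (c :: r.1, r.2)

def splitSlash (cs : List Char) : List (List Char) := (splitSlashAux cs).1 :: (splitSlashAux cs).2

theorem aux_slash (rest : List Char) :
    splitSlashAux ('/' :: rest) = ([], (splitSlashAux rest).1 :: (splitSlashAux rest).2) := by
  simp [splitSlashAux]

theorem aux_ne (c : Char) (rest : List Char) (hc : c ≠ '/') :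
    splitSlashAux (c :: rest) = (c :: (splitSlashAux rest).1, (splitSlashAux rest).2) := by
  simp [splitSlashAux, hc]

theorem splitSlash_shape (u : List Char) :
    splitSlash u = (splitSlashAux u).1 :: (splitSlashAux u).2 := rfl

theorem splitSlash_length_pos (u : List Char) : 0 < (splitSlash u).length := by
  rw [splitSlash_shape]; simp

theorem go_eq (fuel : Nat) : ∀ (l cur : List Char) (acc : List (List Char)), l.length < fuel →
    PySem.Chars.splitOn.go ['/'] fuel l cur acc =
      acc.reverse ++ (cur.reverse ++ (splitSlashAux l).1) :: (splitSlashAux l).2 := by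
  induction fuel with
  | zero => intro l cur acc h; exact absurd h (by omega)
  | succ fuel ih =>
    intro l cur acc h
    cases l with
    | nil => simp [PySem.Chars.splitOn.go, splitSlashAux]
    | cons c rest =>
      by_cases hc : c = '/'
      · subst hc
        rw [PySem.Chars.splitOn.go]
        simp only [List.isPrefixOf, BEq.rfl, Bool.true_and, if_pos]
        rw [ih _ _ _ (by simpa using Nat.lt_of_succ_lt_succ h)]
        simp [aux_slash]
      · rw [PySem.Chars.splitOn.go]
        have hpre : (['/'].isPrefixOf (c :: rest)) = false := by
          simp [List.isPrefixOf]; exact fun h' => absurd h'.symm hc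
        rw [hpre]
        simp only [Bool.false_eq_true, ite_false]
        rw [ih _ _ _ (by simpa using Nat.lt_of_succ_lt_succ h)]
        simp [aux_ne _ _ hc]

theorem splitOn_eq_splitSlash (u : List Char) :
    PySem.Chars.splitOn u ['/'] = splitSlash u := by
  rw [PySem.Chars.splitOn, go_eq (u.length + 1) u [] [] (by omega)]
  simp [splitSlash_shape]

theorem aux_append (v w : List Char) :
    splitSlashAux (v ++ '/' :: w) = ((splitSlashAux v).1, (splitSlashAux v).2 ++ splitSlash w) := by
  induction v with
  | nil => simp [aux_slash, splitSlash, splitSlashAux]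
  | cons c v ih =>
    by_cases hc : c = '/'
    · subst hc
      rw [List.cons_append, aux_slash, aux_slash, ih]; simp
    · rw [List.cons_append, aux_ne _ _ hc, aux_ne _ _ hc, ih]

theorem splitSlash_append (v w : List Char) :
    splitSlash (v ++ '/' :: w) = splitSlash v ++ splitSlash w := by
  simp [splitSlash, aux_append]

theorem intercalate_cons₂ (s x y : List Char) (zs : List (List Char)) :
    s.intercalate (x :: y :: zs) = x ++ s ++ s.intercalate (y :: zs) := by
  simp [List.intercalate, List.intersperse]

theorem join_splitSlash (u : List Char) : List.intercalate ['/'] (splitSlash u) = u := by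
  induction u with
  | nil => simp [splitSlash, splitSlashAux, List.intercalate]
  | cons c u ih =>
    by_cases hc : c = '/'
    · subst hc
      simp only [splitSlash_shape, aux_slash]
      rw [intercalate_cons₂, ← splitSlash_shape, ih]
      rfl
    · simp only [splitSlash_shape, aux_ne _ _ hc]
      cases h2 : (splitSlashAux u).2 with
      | nil =>
        have := ih; rw [splitSlash_shape, h2] at this
        simp [List.intercalate] at this ⊢
        simp [this]
      | cons p ps =>
        rw [intercalate_cons₂]
        have := ih
        rw [splitSlash_shape, h2, intercalate_cons₂] at this
        simp only [List.cons_append, List.nil_append, List.append_assoc] at this ⊢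
        rw [this]

theorem intercalate_append_ne_nil (s : List Char) (Q R : List (List Char))
    (hQ : Q ≠ []) (hR : R ≠ []) :
    s.intercalate (Q ++ R) = s.intercalate Q ++ s ++ s.intercalate R := by
  induction Q with
  | nil => exact absurd rfl hQ
  | cons q Q ih =>
    cases Q with
    | nil =>
      cases R with
      | nil => exact absurd rfl hR
      | cons r R => simp [List.intercalate]
    | cons q' Q' =>
      have ih' := ih (by simp)
      simp only [List.cons_append] at ih' ⊢
      rw [intercalate_cons₂, ih', intercalate_cons₂]
      simp [List.append_assoc]

-- the component-tail test of B implies the endswith test of A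
theorem cond_to_endswith (u : List Char) (k : Nat) (hk : 0 < k) (hk3 : k ≤ 3)
    (hlen : k < (splitSlash u).length)
    (hdrop : (splitSlash u).drop ((splitSlash u).length - k) = nuCanon.take k) :
    PySem.Chars.endswith u ('/' :: List.intercalate ['/'] (nuCanon.take k)) = true := by
  set Q := (splitSlash u).take ((splitSlash u).length - k) with hQdef
  have hsplit : splitSlash u = Q ++ nuCanon.take k := by
    rw [hQdef, ← hdrop, List.take_append_drop]
  have hu : u = List.intercalate ['/'] (splitSlash u) := (join_splitSlash u).symm
  rw [hsplit] at hu
  have hQ : Q ≠ [] := by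
    apply List.ne_nil_of_length_pos
    rw [hQdef, List.length_take]
    omega
  have hC : nuCanon.take k ≠ [] := by
    apply List.ne_nil_of_length_pos
    simp [nuCanon]
    omega
  rw [intercalate_append_ne_nil _ _ _ hQ hC] at hu
  rw [PySem.Chars.endswith_iff]
  exact ⟨List.intercalate ['/'] Q, by rw [hu]; simp [List.append_assoc]⟩

-- shape facts for the positive branches
theorem parts_facts (v : List Char) (cs : List (List Char)) (k : Nat) (hlen : cs.length = k) :
    k < (splitSlash v ++ cs).length ∧
    (splitSlash v ++ cs).drop ((splitSlash v ++ cs).length - k) = cs ∧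
    (splitSlash v ++ cs).take ((splitSlash v ++ cs).length - k) = splitSlash v := by
  have hp := splitSlash_length_pos v
  have h1 : (splitSlash v ++ cs).length = (splitSlash v).length + k := by
    simp [hlen]
  refine ⟨by omega, ?_, ?_⟩
  · rw [h1, Nat.add_sub_cancel, List.drop_left]
  · rw [h1, Nat.add_sub_cancel, List.take_left]

-- the main equivalence, at the level of the shared cleaned-up URL
theorem core_eq (u : List Char) :
    (if PySem.Chars.endswith u "/v1/chat/completions".toList = false then
      String.ofList
        ((if PySem.Chars.endswith u "/v1/chat".toList then PySem.Chars.slice u none (some (-8))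
          else if PySem.Chars.endswith u "/v1".toList then PySem.Chars.slice u none (some (-3))
          else u) ++ "/v1/chat/completions".toList)
     else String.ofList u)
  = String.ofList (PySem.Chars.join ['/']
      (let parts := PySem.Chars.splitOn u ['/']
       if 3 < parts.length ∧ PySem.List.slice parts (some (-3)) none = nuCanon.take 3 then
         PySem.List.slice parts none (some (-3))
       else if 2 < parts.length ∧ PySem.List.slice parts (some (-2)) none = nuCanon.take 2 then
         PySem.List.slice parts none (some (-2))
       else if 1 < parts.length ∧ PySem.List.slice parts (some (-1)) none = nuCanon.take 1 then
         PySem.List.slice parts none (some (-1))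
       else parts) ++ "/v1/chat/completions".toList) := by
  simp only [splitOn_eq_splitSlash, PySem.Chars.join]
  have s3f : PySem.List.slice (splitSlash u) (some (-3)) none
      = (splitSlash u).drop ((splitSlash u).length - 3) :=
    PySem.List.slice_from_neg_ofNat _ 3 (by norm_num)
  have s2f : PySem.List.slice (splitSlash u) (some (-2)) none
      = (splitSlash u).drop ((splitSlash u).length - 2) :=
    PySem.List.slice_from_neg_ofNat _ 2 (by norm_num)
  have s1f : PySem.List.slice (splitSlash u) (some (-1)) none
      = (splitSlash u).drop ((splitSlash u).length - 1) :=
    PySem.List.slice_from_neg_one _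
  have s3t : PySem.List.slice (splitSlash u) none (some (-3))
      = (splitSlash u).take ((splitSlash u).length - 3) :=
    PySem.List.slice_to_neg_ofNat _ 3 (by norm_num)
  have s2t : PySem.List.slice (splitSlash u) none (some (-2))
      = (splitSlash u).take ((splitSlash u).length - 2) :=
    PySem.List.slice_to_neg_ofNat _ 2 (by norm_num)
  have s1t : PySem.List.slice (splitSlash u) none (some (-1))
      = (splitSlash u).take ((splitSlash u).length - 1) := by
    rw [PySem.List.slice_to_neg_one, List.dropLast_eq_take]
  simp only [s3f, s2f, s1f, s3t, s2t, s1t]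
  by_cases E3 : PySem.Chars.endswith u "/v1/chat/completions".toList = true
  · -- u already ends with the full suffix
    obtain ⟨v, hv⟩ := (PySem.Chars.endswith_iff _ _).mp E3
    have hu : u = v ++ '/' :: "v1/chat/completions".toList := by rw [← hv]; rfl
    have hsp : splitSlash u = splitSlash v ++ nuCanon := by
      rw [hu, splitSlash_append,
          show splitSlash "v1/chat/completions".toList = nuCanon from by decide]
    obtain ⟨hc1, hc2, hc3⟩ := parts_facts v nuCanon 3 (by decide)
    have hcond : 3 < (splitSlash v ++ nuCanon).length ∧
        (splitSlash v ++ nuCanon).drop ((splitSlash v ++ nuCanon).length - 3) = nuCanon.take 3 :=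
      ⟨hc1, by rw [hc2]; decide⟩
    rw [E3]
    simp only [Bool.true_eq_false, if_false]
    rw [hsp, if_pos hcond, hc3, join_splitSlash, hu]
    rfl
  · -- u does not end with the full suffix: B's k = 3 test fails too
    have E3' : PySem.Chars.endswith u "/v1/chat/completions".toList = false := by
      simpa using E3
    have nc3 : ¬(3 < (splitSlash u).length ∧
        (splitSlash u).drop ((splitSlash u).length - 3) = nuCanon.take 3) := by
      rintro ⟨h1, h2⟩
      have := cond_to_endswith u 3 (by norm_num) (by norm_num) h1 h2
      rw [show ('/' :: List.intercalate ['/'] (nuCanon.take 3)) = "/v1/chat/completions".toList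
            from by decide] at this
      rw [E3'] at this; exact Bool.false_ne_true this
    rw [E3']
    simp only [if_neg nc3]
    by_cases E2 : PySem.Chars.endswith u "/v1/chat".toList = true
    · -- ends with "/v1/chat"
      obtain ⟨v, hv⟩ := (PySem.Chars.endswith_iff _ _).mp E2
      have hu : u = v ++ '/' :: "v1/chat".toList := by rw [← hv]; rfl
      have hsp : splitSlash u = splitSlash v ++ nuCanon.take 2 := by
        rw [hu, splitSlash_append,
            show splitSlash "v1/chat".toList = nuCanon.take 2 from by decide]
      obtain ⟨hc1, hc2, hc3⟩ := parts_facts v (nuCanon.take 2) 2 (by decide)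
      have hcond : 2 < (splitSlash v ++ nuCanon.take 2).length ∧
          (splitSlash v ++ nuCanon.take 2).drop ((splitSlash v ++ nuCanon.take 2).length - 2)
            = nuCanon.take 2 := ⟨hc1, by rw [hc2]⟩
      rw [if_pos E2, hsp, if_pos hcond, hc3, join_splitSlash]
      have hlen : u.length = v.length + 8 := by
        rw [hu]; simp
      have htake : PySem.Chars.slice u none (some (-8)) = v := by
        rw [PySem.Chars.slice_eq_listSlice, PySem.List.slice_to_neg_ofNat u 8 (by norm_num),
            hlen, Nat.add_sub_cancel, hu, List.take_left]
      rw [htake]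
      simp
    · -- does not end with "/v1/chat": B's k = 2 test fails too
      have E2' : PySem.Chars.endswith u "/v1/chat".toList = false := by simpa using E2
      have nc2 : ¬(2 < (splitSlash u).length ∧
          (splitSlash u).drop ((splitSlash u).length - 2) = nuCanon.take 2) := by
        rintro ⟨h1, h2⟩
        have := cond_to_endswith u 2 (by norm_num) (by norm_num) h1 h2
        rw [show ('/' :: List.intercalate ['/'] (nuCanon.take 2)) = "/v1/chat".toList
              from by decide] at this
        rw [E2'] at this; exact Bool.false_ne_true this
      rw [if_neg E2, if_neg nc2]
      by_cases E1 : PySem.Chars.endswith u "/v1".toList = true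
      · -- ends with "/v1"
        obtain ⟨v, hv⟩ := (PySem.Chars.endswith_iff _ _).mp E1
        have hu : u = v ++ '/' :: "v1".toList := by rw [← hv]; rfl
        have hsp : splitSlash u = splitSlash v ++ nuCanon.take 1 := by
          rw [hu, splitSlash_append,
              show splitSlash "v1".toList = nuCanon.take 1 from by decide]
        obtain ⟨hc1, hc2, hc3⟩ := parts_facts v (nuCanon.take 1) 1 (by decide)
        have hcond : 1 < (splitSlash v ++ nuCanon.take 1).length ∧
            (splitSlash v ++ nuCanon.take 1).drop ((splitSlash v ++ nuCanon.take 1).length - 1)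
              = nuCanon.take 1 := ⟨hc1, by rw [hc2]⟩
        rw [if_pos E1, hsp, if_pos hcond, hc3, join_splitSlash]
        have hlen : u.length = v.length + 3 := by
          rw [hu]; simp
        have htake : PySem.Chars.slice u none (some (-3)) = v := by
          rw [PySem.Chars.slice_eq_listSlice, PySem.List.slice_to_neg_ofNat u 3 (by norm_num),
              hlen, Nat.add_sub_cancel, hu, List.take_left]
        rw [htake]
        simp
      · -- no suffix matches at all
        have E1' : PySem.Chars.endswith u "/v1".toList = false := by simpa using E1
        have nc1 : ¬(1 < (splitSlash u).length ∧
            (splitSlash u).drop ((splitSlash u).length - 1) = nuCanon.take 1) := by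
          rintro ⟨h1, h2⟩
          have := cond_to_endswith u 1 (by norm_num) (by norm_num) h1 h2
          rw [show ('/' :: List.intercalate ['/'] (nuCanon.take 1)) = "/v1".toList
                from by decide] at this
          rw [E1'] at this; exact Bool.false_ne_true this
        rw [if_neg E1, if_neg nc1, join_splitSlash]
        simp

-- ===== VERDICT (by name: the statement is the Claim_ definition above) =====
theorem normalize_url_py_spec : Claim_equal_normalize_url_py := by
  intro raw _
  unfold Spec_normalize_url_py normalize_url_py normalize_url_py_alt
  exact core_eq (pyRstripSlash (PySem.Chars.strip raw.toList))
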